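-- pv_equiv track=rewrite | github.com/AqsaMakhdoomi/Two-sided-fair-route-recommendation | Recommendation/Proposed model.py | SP
-- ===== SOURCE A (Python) =====
-- def SP(source,des):
--
--  a,b=source
--  c,d=des
--  shortest_path=[source]
--  row=abs(c-a) #move these many rows down
--  col=abs(d-b)
--  if c!=a:
--   row_dir=int(row/(c-a))
--  else:
--   row_dir=1
--  if d!=b:
--   col_dir=int(col/(d-b))
--  #find min(row,col)
--  else:
--    col_dir=1
--  if row<=col:
--    eql_move=row
--    #row=0   #we dont need to move any more rows now
--  else:
--    eql_move=col
--   # col=0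
--  row=row-eql_move
--  col=col-eql_move
--  for i in range(1,eql_move+1): #adds (2,2),(3,3),...
--   a=a+row_dir
--   b=b+col_dir
--   shortest_path.append(tuple([a,b]))
--
--  for j in range(0,col):
--    b=b+col_dir
--    shortest_path.append(tuple([a,b]))
--  for j in range(0,row):
--    a=a+row_dir
--    shortest_path.append(tuple([a,b]))
--
--
--  return shortest_path
-- ===== SOURCE B (Python) =====
-- def SP(source, des):
--     a, b = source
--     c, d = des
--     row = abs(c - a)
--     col = abs(d - b)
--     rs = 1 if c >= a else -1
--     cs = 1 if d >= b else -1
--     return [(a + rs * min(i, row), b + cs * min(i, col))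
--             for i in range(max(row, col) + 1)]
-- ===== Notes on version B (the rewrite author's own statement) =====
-- stated objective: simpler
-- what changed: Replaces A's stateful walk (mutating (a,b) through three sequential loops with eql_move bookkeeping) by a closed-form list comprehension that computes the i-th path point directly as (a+rs*min(i,row), b+cs*min(i,col)), with no position updates at all.
import Mathlib
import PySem

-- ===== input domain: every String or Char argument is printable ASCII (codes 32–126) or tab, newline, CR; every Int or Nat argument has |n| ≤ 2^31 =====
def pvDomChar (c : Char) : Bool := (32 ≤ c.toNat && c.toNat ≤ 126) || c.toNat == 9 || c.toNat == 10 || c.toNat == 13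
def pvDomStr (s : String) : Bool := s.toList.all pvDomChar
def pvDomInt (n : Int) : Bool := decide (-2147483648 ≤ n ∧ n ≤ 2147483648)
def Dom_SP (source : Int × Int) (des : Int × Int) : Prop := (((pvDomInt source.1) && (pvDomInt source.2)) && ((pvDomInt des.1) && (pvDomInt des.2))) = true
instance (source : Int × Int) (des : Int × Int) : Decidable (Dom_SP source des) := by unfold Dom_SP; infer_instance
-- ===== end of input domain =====

-- B replaces A's stateful walk (three sequential loops mutating (a,b)) by a closed-form
-- comprehension computing each path point directly; objective: simpler.

-- ===== PORT A =====
-- loop bodies of A's three for-loops, named so the proofs can speak about them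
def stepDiagA (row_dir col_dir : Int) (st : Int × Int × List (Int × Int)) (_ : Int) : Int × Int × List (Int × Int) :=
  let a := st.1 + row_dir
  let b := st.2.1 + col_dir
  (a, b, st.2.2 ++ [(a, b)])

def stepColA (col_dir : Int) (st : Int × Int × List (Int × Int)) (_ : Int) : Int × Int × List (Int × Int) :=
  let b := st.2.1 + col_dir
  (st.1, b, st.2.2 ++ [(st.1, b)])

def stepRowA (row_dir : Int) (st : Int × Int × List (Int × Int)) (_ : Int) : Int × Int × List (Int × Int) :=
  let a := st.1 + row_dir
  (a, st.2.1, st.2.2 ++ [(a, st.2.1)])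

def SP (source : Int × Int) (des : Int × Int) : List (Int × Int) :=
  let a := source.1
  let b := source.2
  let c := des.1
  let d := des.2
  let shortest_path : List (Int × Int) := [source]
  let row := |c - a|
  let col := |d - b|
  -- int(row/(c-a)): exact here — |c-a| ≤ 2^32 < 2^53 so the float quotient is exactly ±1,
  -- and int() truncation agrees with floor division on the exact integer quotient
  let row_dir := if c ≠ a then PySem.Int.floordiv row (c - a) else 1
  let col_dir := if d ≠ b then PySem.Int.floordiv col (d - b) else 1
  let eql_move := if row ≤ col then row else col
  let row := row - eql_move
  let col := col - eql_move
  let s1 := (PySem.List.pyRange 1 (eql_move + 1) 1).foldl (stepDiagA row_dir col_dir) (a, b, shortest_path)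
  let s2 := (PySem.List.pyRange 0 col 1).foldl (stepColA col_dir) s1
  let s3 := (PySem.List.pyRange 0 row 1).foldl (stepRowA row_dir) s2
  s3.2.2

-- ===== PORT B =====
def SP_alt (source : Int × Int) (des : Int × Int) : List (Int × Int) :=
  let a := source.1
  let b := source.2
  let c := des.1
  let d := des.2
  let row := |c - a|
  let col := |d - b|
  let rs : Int := if c ≥ a then 1 else -1
  let cs : Int := if d ≥ b then 1 else -1
  (PySem.List.pyRange 0 (max row col + 1) 1).map
    (fun i => (a + rs * min i row, b + cs * min i col))

-- ===== PRECONDITION & SPEC =====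
def Spec_SP (source : Int × Int) (des : Int × Int) (out : List (Int × Int)) : Prop := out = SP_alt source des
instance (source : Int × Int) (des : Int × Int) (out : List (Int × Int)) : Decidable (Spec_SP source des out) := by unfold Spec_SP; infer_instance

-- ===== CLAIM (what is proved, stated in full; the proofs are below) =====
def Claim_equal_SP : Prop := ∀ (source : Int × Int) (des : Int × Int), Dom_SP source des → Spec_SP source des (SP source des)

-- ===== LEMMAS AND PROOFS =====

-- abs x floor-divided by x is the sign (±1) for x ≠ 0
theorem floordiv_abs_self (x : Int) (hx : x ≠ 0) :
    PySem.Int.floordiv |x| x = if 0 ≤ x then 1 else -1 := by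
  rcases lt_trichotomy x 0 with h | h | h
  · rw [if_neg (by omega), abs_of_neg h]
    have h2 : PySem.Int.floordiv (-x) x = PySem.Int.floordiv x (-x) := by
      have := PySem.Int.floordiv_neg_neg x (-x)
      simpa using this
    have h3 : PySem.Int.floordiv x (-x) = -1 := by
      rw [PySem.Int.floordiv_eq_iff_of_pos (show (0:Int) < -x by omega)]
      omega
    rw [h2, h3]
  · exact absurd h hx
  · have h3 : PySem.Int.floordiv x x = 1 := by
      rw [PySem.Int.floordiv_eq_iff_of_pos h]
      omega
    rw [if_pos (by omega), abs_of_pos h, h3]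

-- A's diagonal loop: e steps moving both coordinates
theorem foldl_diag (rd cd a b : Int) (p : List (Int × Int)) (n : Nat) :
    (PySem.List.pyRange 1 ((n : Int) + 1) 1).foldl (stepDiagA rd cd) (a, b, p) =
      (a + n * rd, b + n * cd,
        p ++ (PySem.List.pyRange 1 ((n : Int) + 1) 1).map (fun i => (a + i * rd, b + i * cd))) := by
  induction n with
  | zero => simp [PySem.List.pyRange_one_eq_nil]
  | succ m ih =>
    have hsplit : PySem.List.pyRange 1 (((m : Int) + 1) + 1) 1 =
        PySem.List.pyRange 1 ((m : Int) + 1) 1 ++ [(m : Int) + 1] := by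
      have := PySem.List.pyRange_one_succ_right (show (1:Int) ≤ (m : Int) + 1 by omega)
      simpa using this
    push_cast
    rw [hsplit, List.foldl_append, ih, List.map_append]
    simp [stepDiagA, List.append_assoc]
    and_intros <;> ring

-- A's column loop: m steps moving b only
theorem foldl_col (cd a b : Int) (p : List (Int × Int)) (m : Nat) :
    (PySem.List.pyRange 0 (m : Int) 1).foldl (stepColA cd) (a, b, p) =
      (a, b + m * cd,
        p ++ (PySem.List.pyRange 0 (m : Int) 1).map (fun j => (a, b + (j + 1) * cd))) := by
  induction m with
  | zero => simp [PySem.List.pyRange_one_eq_nil]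
  | succ m ih =>
    have hsplit : PySem.List.pyRange 0 ((m : Int) + 1) 1 =
        PySem.List.pyRange 0 (m : Int) 1 ++ [(m : Int)] := by
      have := PySem.List.pyRange_one_succ_right (show (0:Int) ≤ (m : Int) by omega)
      simpa using this
    push_cast
    rw [hsplit, List.foldl_append, ih, List.map_append]
    simp [stepColA, List.append_assoc]
    ring

-- A's row loop: m steps moving a only
theorem foldl_row (rd a b : Int) (p : List (Int × Int)) (m : Nat) :
    (PySem.List.pyRange 0 (m : Int) 1).foldl (stepRowA rd) (a, b, p) =
      (a + m * rd, b,
        p ++ (PySem.List.pyRange 0 (m : Int) 1).map (fun j => (a + (j + 1) * rd, b))) := by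
  induction m with
  | zero => simp [PySem.List.pyRange_one_eq_nil]
  | succ m ih =>
    have hsplit : PySem.List.pyRange 0 ((m : Int) + 1) 1 =
        PySem.List.pyRange 0 (m : Int) 1 ++ [(m : Int)] := by
      have := PySem.List.pyRange_one_succ_right (show (0:Int) ≤ (m : Int) by omega)
      simpa using this
    push_cast
    rw [hsplit, List.foldl_append, ih, List.map_append]
    simp [stepRowA, List.append_assoc]
    ring

-- A's direction computation equals B's sign test
theorem dir_eq (u v : Int) :
    (if v ≠ u then PySem.Int.floordiv |v - u| (v - u) else 1) = if v ≥ u then 1 else -1 := by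
  by_cases h : v = u
  · simp [h]
  · rw [if_pos h, floordiv_abs_self (v - u) (by omega)]
    split_ifs <;> omega

-- B's comprehension starts at i = 0 with the source point
theorem map_split_zero (a b rd cd r k M : Int) (hr : 0 ≤ r) (hk : 0 ≤ k) (hM : 0 ≤ M) :
    (PySem.List.pyRange 0 (M + 1) 1).map (fun i => (a + rd * min i r, b + cd * min i k))
      = (a, b) :: (PySem.List.pyRange 1 (M + 1) 1).map (fun i => (a + rd * min i r, b + cd * min i k)) := by
  rw [PySem.List.pyRange_one_cons (show (0:Int) < M + 1 by omega)]
  simp [min_eq_left hr, min_eq_left hk]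

-- splitting B's comprehension at r when r ≤ k: diagonal prefix, then column-only tail
theorem mix_split_col (a b rd cd r k : Int) (hr : 0 ≤ r) (h : r ≤ k) :
    (PySem.List.pyRange 1 (k + 1) 1).map (fun i => (a + rd * min i r, b + cd * min i k))
      = (PySem.List.pyRange 1 (r + 1) 1).map (fun i => (a + i * rd, b + i * cd))
        ++ (PySem.List.pyRange 0 (k - r) 1).map (fun j => (a + r * rd, b + r * cd + (j + 1) * cd)) := by
  rw [PySem.List.pyRange_one_append 1 (r + 1) (k + 1) (by omega) (by omega), List.map_append]
  congr 1
  · apply List.map_congr_left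
    intro i hi
    rw [PySem.List.mem_pyRange_one] at hi
    have h1 : min i r = i := by omega
    have h2 : min i k = i := by omega
    rw [h1, h2]
    simp [Prod.ext_iff]; constructor <;> ring
  · rw [PySem.List.pyRange_one (r + 1) (k + 1), PySem.List.pyRange_one 0 (k - r), List.map_map, List.map_map]
    have hM : (k + 1 - (r + 1)).toNat = (k - r - 0).toNat := by omega
    rw [hM]
    apply List.map_congr_left
    intro t ht
    rw [List.mem_range] at ht
    have htk : (t : Int) < k - r := by omega
    have h1 : min (r + 1 + (t : Int)) r = r := by omega
    have h2 : min (r + 1 + (t : Int)) k = r + 1 + (t : Int) := by omega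
    simp only [Function.comp_apply, h1, h2, Prod.mk.injEq]
    constructor <;> ring

-- splitting B's comprehension at k when k ≤ r: diagonal prefix, then row-only tail
theorem mix_split_row (a b rd cd r k : Int) (hk : 0 ≤ k) (h : k ≤ r) :
    (PySem.List.pyRange 1 (r + 1) 1).map (fun i => (a + rd * min i r, b + cd * min i k))
      = (PySem.List.pyRange 1 (k + 1) 1).map (fun i => (a + i * rd, b + i * cd))
        ++ (PySem.List.pyRange 0 (r - k) 1).map (fun j => (a + k * rd + (j + 1) * rd, b + k * cd)) := by
  rw [PySem.List.pyRange_one_append 1 (k + 1) (r + 1) (by omega) (by omega), List.map_append]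
  congr 1
  · apply List.map_congr_left
    intro i hi
    rw [PySem.List.mem_pyRange_one] at hi
    have h1 : min i r = i := by omega
    have h2 : min i k = i := by omega
    rw [h1, h2]
    simp [Prod.ext_iff]; constructor <;> ring
  · rw [PySem.List.pyRange_one (k + 1) (r + 1), PySem.List.pyRange_one 0 (r - k), List.map_map, List.map_map]
    have hM : (r + 1 - (k + 1)).toNat = (r - k - 0).toNat := by omega
    rw [hM]
    apply List.map_congr_left
    intro t ht
    rw [List.mem_range] at ht
    have htr : (t : Int) < r - k := by omega
    have h1 : min (k + 1 + (t : Int)) r = k + 1 + (t : Int) := by omega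
    have h2 : min (k + 1 + (t : Int)) k = k := by omega
    simp only [Function.comp_apply, h1, h2, Prod.mk.injEq]
    constructor <;> ring

theorem SP_eq (a b c d : Int) : SP (a, b) (c, d) = SP_alt (a, b) (c, d) := by
  unfold SP SP_alt
  simp only [dir_eq]
  obtain ⟨rn, hrn⟩ : ∃ n : Nat, ((n : Int)) = |c - a| := ⟨(|c - a|).toNat, Int.toNat_of_nonneg (abs_nonneg _)⟩
  obtain ⟨kn, hkn⟩ : ∃ n : Nat, ((n : Int)) = |d - b| := ⟨(|d - b|).toNat, Int.toNat_of_nonneg (abs_nonneg _)⟩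
  rw [← hrn, ← hkn]
  by_cases h : rn ≤ kn
  · have hle : ((rn : Int)) ≤ ((kn : Int)) := by exact_mod_cast h
    rw [if_pos hle, max_eq_right hle, sub_self]
    rw [PySem.List.pyRange_one_eq_nil (le_refl (0 : Int)), List.foldl_nil]
    rw [show ((kn : Int)) - ((rn : Int)) = (((kn - rn : Nat) : Int)) by push_cast [Nat.cast_sub h]; ring]
    rw [foldl_diag, foldl_col]
    dsimp only
    rw [map_split_zero a b _ _ ((rn : Int)) ((kn : Int)) ((kn : Int)) (by positivity) (by positivity) (by positivity)]
    rw [mix_split_col a b _ _ ((rn : Int)) ((kn : Int)) (by positivity) hle]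
    push_cast [Nat.cast_sub h]
    simp
  · have hle : ((kn : Int)) ≤ ((rn : Int)) := by omega
    rw [if_neg (show ¬((rn : Int) ≤ ((kn : Int))) by omega), max_eq_left hle, sub_self]
    rw [PySem.List.pyRange_one_eq_nil (le_refl (0 : Int)), List.foldl_nil]
    rw [show ((rn : Int)) - ((kn : Int)) = (((rn - kn : Nat) : Int)) by push_cast [Nat.cast_sub (show kn ≤ rn by omega)]; omega]
    rw [foldl_diag, foldl_row]
    dsimp only
    rw [map_split_zero a b _ _ ((rn : Int)) ((kn : Int)) ((rn : Int)) (by positivity) (by positivity) (by positivity)]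
    rw [mix_split_row a b _ _ ((rn : Int)) ((kn : Int)) (by positivity) hle]
    push_cast [Nat.cast_sub (show kn ≤ rn by omega)]
    simp

-- ===== VERDICT (by name: the statement is the Claim_ definition above) =====
theorem SP_spec : Claim_equal_SP := by
  intro source des _
  unfold Spec_SP
  obtain ⟨a, b⟩ := source
  obtain ⟨c, d⟩ := des
  exact SP_eq a b c d
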